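-- pv_equiv track=rewrite | github.com/muteshi/split-string | splitString.py | split_string
-- ===== SOURCE A (Python) =====
-- def split_string(s):
--     """
--      Return total number of ways to split the given string into three non-overlapping
--      substrings having the same number of As.
--     """
--
--     len_of_string = len(s)
--
--     total_num_zeroes = 0 #initialize sum of zeroes
--
--     #compute the sum of zeroes
--     for i in range(len_of_string):
--         if s[i] == '0':
--             total_num_zeroes += 1
--
--     #1st edge case
--     #sum of zeros is not divisible by 3
--     #Return zero
--     if total_num_zeroes % 3 != 0:
--         return 0
--
--     #2nd edge case
--     #sum of zeros  is 0
--     #Return zero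
--     if total_num_zeroes == 0:
--         return 0
--
--
--     #initialize sum of zeroes in each string part
--     sum_of_zeroes_in_str_part = total_num_zeroes // 3
--
--     #initialize ways to cut string
--     first_cut,second_cut = 0,0
--
--     #initialize count
--     zero_count = 0
--
--     #loop from the start
--     for i in range(len_of_string):
--
--         #increment count if element is '0'
--         if s[i] == '0':
--             zero_count += 1
--
--
--         if (zero_count == sum_of_zeroes_in_str_part):
--             first_cut += 1
--
--         elif (zero_count == 2 * sum_of_zeroes_in_str_part):
--             second_cut += 1
--
--     return first_cut * second_cut
-- ===== SOURCE B (Python) =====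
-- def split_string(s):
--     """Gap arithmetic over the zero-index table instead of a counting scan of cut positions."""
--     zeros = [i for i, c in enumerate(s) if c == '0']
--     total = len(zeros)
--     if total % 3 != 0 or total == 0:
--         return 0
--     k = total // 3
--     return (zeros[k] - zeros[k - 1]) * (zeros[2 * k] - zeros[2 * k - 1])
-- ===== Notes on version B (the rewrite author's own statement) =====
-- stated objective: simpler
-- what changed: Replaces A's second full counting scan over all cut positions with a zero-index table built once; the two cut counts become gap differences zeros[k]-zeros[k-1] and zeros[2k]-zeros[2k-1].
import Mathlib
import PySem

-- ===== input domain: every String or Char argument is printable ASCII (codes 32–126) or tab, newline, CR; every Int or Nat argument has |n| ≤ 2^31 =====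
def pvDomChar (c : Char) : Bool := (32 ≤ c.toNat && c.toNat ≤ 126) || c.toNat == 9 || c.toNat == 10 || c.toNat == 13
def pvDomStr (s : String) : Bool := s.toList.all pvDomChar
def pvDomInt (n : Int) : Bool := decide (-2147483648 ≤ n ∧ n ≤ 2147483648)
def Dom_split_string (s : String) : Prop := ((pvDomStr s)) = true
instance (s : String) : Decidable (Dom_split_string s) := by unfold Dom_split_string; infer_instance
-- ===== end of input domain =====

-- B replaces A's second counting scan over all cut positions with a zero-index table and gap arithmetic (simpler; same O(n) cost).


-- ===== PORT A =====
def split_string (s : String) : Int :=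
  let l := s.toList
  let total_num_zeroes : Int := l.foldl (fun acc c => if c = '0' then acc + 1 else acc) 0
  if PySem.Int.mod total_num_zeroes 3 ≠ 0 then 0
  else if total_num_zeroes = 0 then 0
  else
    let part : Int := PySem.Int.floordiv total_num_zeroes 3
    let st := l.foldl (fun (st : Int × Int × Int) c =>
        let zc := if c = '0' then st.1 + 1 else st.1
        if zc = part then (zc, st.2.1 + 1, st.2.2)
        else if zc = 2 * part then (zc, st.2.1, st.2.2 + 1)
        else (zc, st.2.1, st.2.2)) (0, 0, 0)
    st.2.1 * st.2.2

-- ===== PORT B =====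
def split_string_alt (s : String) : Int :=
  let zeros : List Int :=
    (PySem.List.enumerate s.toList 0).foldr (fun p acc => if p.2 = '0' then p.1 :: acc else acc) []
  let total : Int := zeros.length
  if PySem.Int.mod total 3 ≠ 0 ∨ total = 0 then 0
  else
    let k : Int := PySem.Int.floordiv total 3
    -- indices k, k-1, 2k, 2k-1 are always in range here (proved below); pyGetD is exact there
    (PySem.List.pyGetD zeros k 0 - PySem.List.pyGetD zeros (k - 1) 0) *
      (PySem.List.pyGetD zeros (2 * k) 0 - PySem.List.pyGetD zeros (2 * k - 1) 0)

-- ===== PRECONDITION & SPEC =====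
def Spec_split_string (s : String) (out : Int) : Prop := out = split_string_alt s
instance (s : String) (out : Int) : Decidable (Spec_split_string s out) := by unfold Spec_split_string; infer_instance

-- ===== CLAIM (what is proved, stated in full; the proofs are below) =====
def Claim_equal_split_string : Prop := ∀ (s : String), Dom_split_string s → Spec_split_string s (split_string s)

-- ===== LEMMAS AND PROOFS =====

/-- Indices of the '0' characters, in order (proof-side model of B's zero table). -/
def zs : List Char → List Nat
  | [] => []
  | x :: t => if x = '0' then 0 :: (zs t).map (· + 1) else (zs t).map (· + 1)

/-- Proof-side model of A's cut counting: number of positions whose running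
    zero count (starting from `c`) equals `t` after processing the position. -/
def g : List Char → Nat → Nat → Nat
  | [], _, _ => 0
  | x :: xs, c, t =>
    let c' := if x = '0' then c + 1 else c
    (if c' = t then 1 else 0) + g xs c' t

theorem zs_length (l : List Char) : (zs l).length = l.countP (· = '0') := by
  induction l with
  | nil => simp [zs]
  | cons x t ih =>
    by_cases h : x = '0' <;> simp [zs, h, ih]

theorem g_gt (l : List Char) (c t : Nat) (h : t < c) : g l c t = 0 := by
  induction l generalizing c with
  | nil => simp [g]
  | cons x xs ih =>
    by_cases hx : x = '0' <;> simp [g, hx] <;>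
      [exact ⟨by omega, ih (c + 1) (by omega)⟩; exact ⟨by omega, ih c h⟩]

theorem g_eq (l : List Char) (t : Nat) (h : 1 ≤ (zs l).length) :
    g l t t = (zs l).getD 0 0 := by
  induction l generalizing t with
  | nil => simp [zs] at h
  | cons x xs ih =>
    by_cases hx : x = '0'
    · simp [g, hx, zs, g_gt xs (t + 1) t (by omega)]
    · simp [zs, hx] at h ⊢
      rcases List.exists_cons_of_ne_nil (List.ne_nil_of_length_pos (by omega) :
        zs xs ≠ []) with ⟨a, r, hr⟩
      simp [g, hx, ih t (by omega), hr]
      omega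

theorem getD_map_add_one (xs : List Nat) (j : Nat) (h : j < xs.length) :
    (xs.map (· + 1)).getD j 0 = xs.getD j 0 + 1 := by
  rw [List.getD_eq_getElem _ _ (by simpa using h), List.getD_eq_getElem _ _ h]
  simp

theorem g_main (l : List Char) (c t : Nat) (hct : c < t)
    (hlen : t - c < (zs l).length) :
    (zs l).getD (t - c - 1) 0 + g l c t = (zs l).getD (t - c) 0 := by
  induction l generalizing c with
  | nil => simp [zs] at hlen
  | cons x xs ih =>
    by_cases hx : x = '0'
    · simp only [zs, if_pos hx] at hlen ⊢
      simp only [List.length_cons, List.length_map] at hlen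
      simp only [g, if_pos hx]
      by_cases he : c + 1 = t
      · have hx1 : 1 ≤ (zs xs).length := by omega
        have hge := g_eq xs t hx1
        have hm := getD_map_add_one (zs xs) 0 (by omega)
        have c1 : (0 :: (zs xs).map (· + 1)).getD (t - c - 1) 0 = 0 := by
          rw [(by omega : t - c - 1 = 0)]; rfl
        have c2 : (0 :: (zs xs).map (· + 1)).getD (t - c) 0
            = ((zs xs).map (· + 1)).getD 0 0 := by
          rw [(by omega : t - c = 0 + 1), List.getD_cons_succ]
        rw [c1, c2, he, if_pos rfl]
        omega
      · have hb : t - (c + 1) < (zs xs).length := by omega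
        have hrec := ih (c + 1) (by omega) hb
        obtain ⟨j, hj⟩ : ∃ j, t - c = j + 2 := ⟨t - c - 2, by omega⟩
        rw [(by omega : t - (c + 1) - 1 = j), (by omega : t - (c + 1) = j + 1)] at hrec
        have hm1 := getD_map_add_one (zs xs) j (by omega)
        have hm2 := getD_map_add_one (zs xs) (j + 1) (by omega)
        rw [hj, (by omega : j + 2 - 1 = j + 1), List.getD_cons_succ, List.getD_cons_succ,
          if_neg he]
        omega
    · simp only [zs, if_neg hx] at hlen ⊢
      simp only [List.length_map] at hlen
      have hrec := ih c hct hlen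
      have hm1 := getD_map_add_one (zs xs) (t - c - 1) (by omega)
      have hm2 := getD_map_add_one (zs xs) (t - c) hlen
      simp only [g, if_neg hx, if_neg (by omega : ¬ (c = t))]
      omega

/-- A's first fold counts the zeros. -/
theorem foldA_count (l : List Char) (a : Nat) :
    l.foldl (fun acc c => if c = '0' then acc + 1 else acc) (a : Int)
      = ((a + l.countP (· = '0') : Nat) : Int) := by
  induction l generalizing a with
  | nil => simp
  | cons x xs ih =>
    by_cases hx : x = '0'
    · rw [List.foldl_cons, if_pos hx,
        (by push_cast; ring : ((a : Int) + 1) = ((a + 1 : Nat) : Int)), ih]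
      exact congrArg (fun n : Nat => (n : Int)) (by simp [hx]; omega)
    · rw [List.foldl_cons, if_neg hx, ih]
      exact congrArg (fun n : Nat => (n : Int)) (by simp [hx])

/-- A's second fold computes the zero count together with the two g-counters. -/
theorem foldA_spec (l : List Char) (t : Nat) (ht : 1 ≤ t) (c f s2 : Nat) :
    l.foldl (fun (st : Int × Int × Int) ch =>
        let zc := if ch = '0' then st.1 + 1 else st.1
        if zc = (t : Int) then (zc, st.2.1 + 1, st.2.2)
        else if zc = 2 * (t : Int) then (zc, st.2.1, st.2.2 + 1)
        else (zc, st.2.1, st.2.2)) ((c : Int), (f : Int), (s2 : Int))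
      = (((c + l.countP (· = '0') : Nat) : Int), ((f + g l c t : Nat) : Int),
          ((s2 + g l c (2 * t) : Nat) : Int)) := by
  induction l generalizing c f s2 with
  | nil => simp [g]
  | cons x xs ih =>
    have hcast : ∀ m : Nat, (if x = '0' then (m : Int) + 1 else (m : Int))
        = ((if x = '0' then m + 1 else m : Nat) : Int) := by
      intro m; by_cases hx : x = '0' <;> simp [hx]
    set c' : Nat := if x = '0' then c + 1 else c with hc'
    have hcnt : (x :: xs).countP (· = '0') = xs.countP (· = '0') + (if x = '0' then 1 else 0) := by
      by_cases hx : x = '0' <;> simp [hx]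
    have hcc : c + (x :: xs).countP (· = '0') = c' + xs.countP (· = '0') := by
      by_cases hx : x = '0' <;> simp [hc', hcnt, hx] <;> omega
    have hg1 : f + g (x :: xs) c t = (f + (if c' = t then 1 else 0)) + g xs c' t := by
      simp only [g, hc']; omega
    have hg2 : s2 + g (x :: xs) c (2 * t) = (s2 + (if c' = 2 * t then 1 else 0)) + g xs c' (2 * t) := by
      simp only [g, hc']; omega
    simp only [List.foldl_cons, hcast, ← hc']
    by_cases h1 : c' = t
    · have h2 : c' ≠ 2 * t := by omega
      rw [if_pos (by exact_mod_cast congrArg (Nat.cast : Nat → Int) h1)]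
      rw [(by push_cast; ring : ((f : Int) + 1) = ((f + 1 : Nat) : Int)), ih c' (f + 1) s2]
      rw [hcc, hg1, hg2, if_pos h1, if_neg h2]
      simp
    · have h1' : ((c' : Nat) : Int) ≠ (t : Int) := by exact_mod_cast h1
      by_cases h2 : c' = 2 * t
      · have h2' : ((c' : Nat) : Int) = 2 * (t : Int) := by
          rw [h2]; push_cast; ring
        rw [if_neg h1', if_pos h2']
        rw [(by push_cast; ring : ((s2 : Int) + 1) = ((s2 + 1 : Nat) : Int)), ih c' f (s2 + 1)]
        rw [hcc, hg1, hg2, if_pos h2, if_neg h1]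
        simp
      · have h2' : ((c' : Nat) : Int) ≠ 2 * (t : Int) := by
          intro hh
          exact h2 (by exact_mod_cast hh.trans (by push_cast; ring : 2 * (t : Int) = ((2 * t : Nat) : Int)))
        rw [if_neg h1', if_neg h2', ih c' f s2]
        rw [hcc, hg1, hg2, if_neg h1, if_neg h2]
        simp

/-- B's comprehension over `enumerate` builds the shifted zero-index table. -/
theorem zeros_fold (l : List Char) (s : Int) :
    (PySem.List.enumerate l s).foldr (fun p acc => if p.2 = '0' then p.1 :: acc else acc) []
      = (zs l).map (fun n : Nat => s + (n : Int)) := by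
  induction l generalizing s with
  | nil => simp [PySem.List.enumerate_nil, zs]
  | cons x xs ih =>
    rw [PySem.List.enumerate_cons, List.foldr_cons, ih (s + 1)]
    by_cases hx : x = '0'
    · rw [if_pos hx]
      simp only [zs, if_pos hx, List.map_cons, List.map_map]
      refine congrArg₂ List.cons (by push_cast; ring) ?_
      exact List.map_congr_left fun a _ => by
        simp only [Function.comp_apply]; push_cast; ring
    · rw [if_neg hx]
      simp only [zs, if_neg hx, List.map_map]
      exact List.map_congr_left fun a _ => by
        simp only [Function.comp_apply]; push_cast; ring

theorem split_string_eq_alt (s : String) : split_string s = split_string_alt s := by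
  unfold split_string split_string_alt
  set l := s.toList with hl
  set cnt : Nat := l.countP (· = '0') with hcnt
  have htot : l.foldl (fun acc c => if c = '0' then acc + 1 else acc) (0 : Int) = (cnt : Int) := by
    simpa using foldA_count l 0
  have hzz : (PySem.List.enumerate l 0).foldr
      (fun p acc => if p.2 = '0' then p.1 :: acc else acc) []
        = (zs l).map (fun n : Nat => (n : Int)) := by
    rw [zeros_fold l 0]
    exact List.map_congr_left fun a _ => by ring
  have hlen2 : ((((zs l).map (fun n : Nat => (n : Int))).length : Nat) : Int) = (cnt : Int) := by
    simp [zs_length, hcnt]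
  simp only [htot, hzz, hlen2]
  by_cases h3 : PySem.Int.mod (cnt : Int) 3 = 0
  · by_cases h0 : (cnt : Int) = 0
    · rw [if_neg (not_not.mpr h3), if_pos h0, if_pos (Or.inr h0)]
    · -- main branch: cnt = 3k with k ≥ 1
      have hdvd : (3 : Int) ∣ (cnt : Int) := (PySem.Int.mod_eq_zero_iff_dvd _ _).mp h3
      have hdvd' : (3 : Nat) ∣ cnt := by
        exact_mod_cast Int.natCast_dvd_natCast.mp (by exact_mod_cast hdvd)
      set k : Nat := cnt / 3 with hkdef
      have hk3 : cnt = 3 * k := by omega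
      have hk1 : 1 ≤ k := by
        by_contra hc
        have hc0 : cnt = 0 := by omega
        exact h0 (by simp [hc0])
      have hfd : PySem.Int.floordiv (cnt : Int) 3 = (k : Int) := by
        exact_mod_cast PySem.Int.floordiv_natCast cnt 3
      rw [if_neg (not_not.mpr h3), if_neg h0, if_neg (not_or.mpr ⟨not_not.mpr h3, h0⟩), hfd]
      rw [show ((0 : Int), (0 : Int), (0 : Int))
          = (((0 : Nat) : Int), ((0 : Nat) : Int), ((0 : Nat) : Int)) by norm_num]
      rw [foldA_spec l k hk1 0 0 0]
      have hlzs : (zs l).length = cnt := by rw [zs_length]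
      have cast_getD : ∀ j : Nat, j < (zs l).length →
          ((zs l).map (fun n : Nat => (n : Int))).getD j 0 = (((zs l).getD j 0 : Nat) : Int) := by
        intro j hj
        rw [List.getD_eq_getElem _ _ (by simpa using hj), List.getD_eq_getElem _ _ hj]
        simp
      have hkl : k < (zs l).length := by omega
      have h2kl : 2 * k < (zs l).length := by omega
      have gk := g_main l 0 k (by omega) (by simpa using hkl)
      have g2k := g_main l 0 (2 * k) (by omega) (by simpa using h2kl)
      simp only [Nat.sub_zero] at gk g2k
      have e1 : PySem.List.pyGetD ((zs l).map (fun n : Nat => (n : Int))) (k : Int) 0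
          = (((zs l).getD k 0 : Nat) : Int) := by
        rw [PySem.List.pyGetD_natCast]; exact cast_getD k hkl
      have e2 : PySem.List.pyGetD ((zs l).map (fun n : Nat => (n : Int))) ((k : Int) - 1) 0
          = (((zs l).getD (k - 1) 0 : Nat) : Int) := by
        rw [show ((k : Int) - 1) = ((k - 1 : Nat) : Int) by omega, PySem.List.pyGetD_natCast]
        exact cast_getD (k - 1) (by omega)
      have e3 : PySem.List.pyGetD ((zs l).map (fun n : Nat => (n : Int))) (2 * (k : Int)) 0
          = (((zs l).getD (2 * k) 0 : Nat) : Int) := by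
        rw [show (2 * (k : Int)) = ((2 * k : Nat) : Int) by push_cast; ring,
          PySem.List.pyGetD_natCast]
        exact cast_getD (2 * k) h2kl
      have e4 : PySem.List.pyGetD ((zs l).map (fun n : Nat => (n : Int))) (2 * (k : Int) - 1) 0
          = (((zs l).getD (2 * k - 1) 0 : Nat) : Int) := by
        rw [show (2 * (k : Int) - 1) = ((2 * k - 1 : Nat) : Int) by omega,
          PySem.List.pyGetD_natCast]
        exact cast_getD (2 * k - 1) (by omega)
      rw [e1, e2, e3, e4]
      have q1 : ((0 + g l 0 k : Nat) : Int)
          = (((zs l).getD k 0 : Nat) : Int) - (((zs l).getD (k - 1) 0 : Nat) : Int) := by omega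
      have q2 : ((0 + g l 0 (2 * k) : Nat) : Int)
          = (((zs l).getD (2 * k) 0 : Nat) : Int) - (((zs l).getD (2 * k - 1) 0 : Nat) : Int) := by
        omega
      rw [q1, q2]
  · rw [if_pos (by simpa using h3), if_pos (Or.inl (by simpa using h3))]

-- ===== VERDICT (by name: the statement is the Claim_ definition above) =====
theorem split_string_spec : Claim_equal_split_string := by
  intro s _
  unfold Spec_split_string
  exact split_string_eq_alt s
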